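-- pv_equiv track=rewrite | github.com/AgustinRebechi/Algoritmos2_UNSAM | Ejercicios resueltos/Recursividad/Pila y cola/resta_lista.py | resta_lista_iterativa
-- ===== SOURCE A (Python) =====
-- def resta_lista_iterativa(xs):
--
--     # Paso 1: Apilar todos los elementos
--     pila = []
--     for elemento in xs:
--         pila.append(elemento)
--
--     # Paso 2: Desapilar y calcular
--     resultado = 0
--     while len(pila) > 0:
--         resultado = pila.pop() - resultado
--
--     return resultado
-- ===== SOURCE B (Python) =====
-- def resta_lista_iterativa(xs):
--     resultado = 0
--     for i, x in enumerate(xs):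
--         resultado += x if i % 2 == 0 else -x
--     return resultado
-- ===== Notes on version B (the rewrite author's own statement) =====
-- stated objective: simpler
-- what changed: Replaced the push-all-then-pop stack with a single forward pass keeping a running accumulator that adds elements at even indices and subtracts at odd indices (the right fold x0-(x1-(x2-...)) equals the forward alternating sum).
import Mathlib
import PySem

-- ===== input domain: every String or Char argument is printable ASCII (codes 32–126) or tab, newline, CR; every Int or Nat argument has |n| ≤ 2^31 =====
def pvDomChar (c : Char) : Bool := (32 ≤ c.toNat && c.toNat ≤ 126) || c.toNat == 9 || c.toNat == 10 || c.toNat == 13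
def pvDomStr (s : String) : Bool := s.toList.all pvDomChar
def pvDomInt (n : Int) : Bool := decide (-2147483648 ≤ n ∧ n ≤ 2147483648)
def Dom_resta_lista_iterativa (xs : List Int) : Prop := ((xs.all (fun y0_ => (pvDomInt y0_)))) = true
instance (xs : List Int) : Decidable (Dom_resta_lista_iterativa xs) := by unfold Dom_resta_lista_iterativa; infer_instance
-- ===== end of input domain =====

-- ===== PORT A =====
-- A: push all elements onto a stack, then pop (from the end) with resultado = pop - resultado.
-- The while loop popping from the end is transcribed as a left fold over the reversed stack.
def resta_lista_iterativa (xs : List Int) : Int :=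
  let pila := xs.foldl (fun p e => p ++ [e]) []
  (pila.reverse).foldl (fun resultado top => top - resultado) 0

-- ===== PORT B =====
-- B: one forward pass with an index-parity accumulator (enumerate loop).
def restaAltGo (xs : List Int) (i : Nat) (resultado : Int) : Int :=
  match xs with
  | [] => resultado
  | x :: t => restaAltGo t (i + 1) (if i % 2 == 0 then resultado + x else resultado - x)

def resta_lista_iterativa_alt (xs : List Int) : Int := restaAltGo xs 0 0

-- ===== PRECONDITION & SPEC =====
def Spec_resta_lista_iterativa (xs : List Int) (out : Int) : Prop := out = resta_lista_iterativa_alt xs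
instance (xs : List Int) (out : Int) : Decidable (Spec_resta_lista_iterativa xs out) := by unfold Spec_resta_lista_iterativa; infer_instance

-- ===== CLAIM (what is proved, stated in full; the proofs are below) =====
def Claim_equal_resta_lista_iterativa : Prop := ∀ (xs : List Int), Dom_resta_lista_iterativa xs → Spec_resta_lista_iterativa xs (resta_lista_iterativa xs)

-- ===== LEMMAS AND PROOFS =====

-- ===== VERDICT (by name: the statement is the Claim_ definition above) =====
-- the canonical alternating right fold both sides equal
def altSub : List Int → Int
  | [] => 0
  | x :: t => x - altSub t

theorem foldl_build (xs acc : List Int) : xs.foldl (fun p e => p ++ [e]) acc = acc ++ xs := by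
  induction xs generalizing acc with
  | nil => simp [List.foldl]
  | cons x t ih => simp [List.foldl, ih]

theorem portA_eq_alt (xs : List Int) : resta_lista_iterativa xs = altSub xs := by
  unfold resta_lista_iterativa
  rw [foldl_build, List.nil_append, List.foldl_reverse]
  induction xs with
  | nil => rfl
  | cons x t ih => simp [List.foldr, altSub, ih]

theorem go_eq (xs : List Int) (i : Nat) (acc : Int) :
    restaAltGo xs i acc = acc + (if i % 2 == 0 then altSub xs else -altSub xs) := by
  induction xs generalizing i acc with
  | nil => simp [restaAltGo, altSub]
  | cons x t ih =>
    have h2 : ((i + 1) % 2 == 0) = !(i % 2 == 0) := by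
      rcases Nat.mod_two_eq_zero_or_one i with h | h <;> simp [Nat.add_mod, h]
    simp only [restaAltGo, altSub, ih, h2]
    rcases Nat.mod_two_eq_zero_or_one i with h | h <;> simp [h] <;> ring

theorem portB_eq_alt (xs : List Int) : resta_lista_iterativa_alt xs = altSub xs := by
  unfold resta_lista_iterativa_alt
  rw [go_eq]; simp

-- ===== VERDICT =====
theorem resta_lista_iterativa_spec : Claim_equal_resta_lista_iterativa := by
  intro xs _
  unfold Spec_resta_lista_iterativa
  rw [portA_eq_alt, portB_eq_alt]
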